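-- pv_equiv track=rewrite | github.com/pypi-data/pypi-mirror-88 | packages/tuhlbox/tuhlbox-0.1.0.tar.gz/tuhlbox-0.1.0/tuhlbox/life.py | get_features_for_sample
-- ===== SOURCE A (Python) =====
-- from collections import defaultdict
--
-- def get_features_for_sample(sample):
--     counts = defaultdict(int)
--     for word in sample:
--         counts[word] += 1
--     v0 = len(counts.keys())
--     v1, v2, v3 = 0, 0, 0
--     for occurrances in counts.values():
--         if occurrances <= 1:
--             v1 += 1
--         elif occurrances <= 4:
--             v2 += 1
--         elif occurrances <= 10:
--             v3 += 1
--
--     return [v0, v1, v2, v3]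
-- ===== SOURCE B (Python) =====
-- from collections import Counter
--
--
-- def _bisect_right(vals, x):
--     lo, hi = 0, len(vals)
--     while lo < hi:
--         mid = (lo + hi) // 2
--         if x < vals[mid]:
--             hi = mid
--         else:
--             lo = mid + 1
--     return lo
--
--
-- def get_features_for_sample(sample):
--     counts = Counter(sample)
--     vals = sorted(counts.values())
--     b1 = _bisect_right(vals, 1)
--     b4 = _bisect_right(vals, 4)
--     b10 = _bisect_right(vals, 10)
--     return [len(counts), b1, b4 - b1, b10 - b4]
-- ===== Notes on version B (the rewrite author's own statement) =====
-- stated objective: alternative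
-- what changed: Replaces A's per-value classification loop with Counter + sorting the counts and locating the bucket boundaries 1/4/10 with a hand-written bisect_right binary search, returning the differences of the boundary indices.
import Mathlib
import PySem

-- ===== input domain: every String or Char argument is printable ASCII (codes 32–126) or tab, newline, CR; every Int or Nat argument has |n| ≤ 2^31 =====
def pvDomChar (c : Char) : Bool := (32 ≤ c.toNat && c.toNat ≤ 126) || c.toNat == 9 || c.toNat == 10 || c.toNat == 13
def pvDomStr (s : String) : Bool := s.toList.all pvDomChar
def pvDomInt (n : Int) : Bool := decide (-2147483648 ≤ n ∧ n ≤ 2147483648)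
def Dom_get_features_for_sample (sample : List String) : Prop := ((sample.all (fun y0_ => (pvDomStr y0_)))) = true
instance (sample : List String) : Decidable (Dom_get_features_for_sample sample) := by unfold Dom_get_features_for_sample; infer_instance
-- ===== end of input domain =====

-- B replaces A's per-value classification loop with an alternative algorithm: sort the count values
-- and locate the bucket boundaries 1/4/10 with a hand-written bisect_right binary search.


-- ===== PORT A =====
def get_features_for_sample (sample : List String) : List Int :=
  let counts := sample.foldl (fun d word => d.modify word 0 (· + 1)) (PySem.Dict.empty : PySem.Dict String Int)
  let v0 : Int := counts.keys.length
  let t := counts.values.foldl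
    (fun (acc : Int × Int × Int) occurrances =>
      if occurrances ≤ 1 then (acc.1 + 1, acc.2.1, acc.2.2)
      else if occurrances ≤ 4 then (acc.1, acc.2.1 + 1, acc.2.2)
      else if occurrances ≤ 10 then (acc.1, acc.2.1, acc.2.2 + 1)
      else acc) (0, 0, 0)
  [v0, t.1, t.2.1, t.2.2]

-- ===== PORT B =====
-- hand-written _bisect_right from Source B; vals.getD mid 0 is exact for vals[mid] here because
-- every call keeps lo < hi ≤ vals.length, so mid is always in range (Python never raises)
def altBisect (vals : List Int) (x : Int) (lo hi : Nat) : Nat :=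
  if lo < hi then
    let mid := (lo + hi) / 2
    if x < vals.getD mid 0 then altBisect vals x lo mid
    else altBisect vals x (mid + 1) hi
  else lo
termination_by hi - lo
decreasing_by all_goals omega

def get_features_for_sample_alt (sample : List String) : List Int :=
  let counts := PySem.Dict.counter sample
  let vals := PySem.List.sorted counts.values (fun v => v) false
  let b1 := altBisect vals 1 0 vals.length
  let b4 := altBisect vals 4 0 vals.length
  let b10 := altBisect vals 10 0 vals.length
  [(counts.keys.length : Int), (b1 : Int), (b4 : Int) - (b1 : Int), (b10 : Int) - (b4 : Int)]

-- ===== PRECONDITION & SPEC =====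
def Spec_get_features_for_sample (sample : List String) (out : List Int) : Prop := out = get_features_for_sample_alt sample
instance (sample : List String) (out : List Int) : Decidable (Spec_get_features_for_sample sample out) := by unfold Spec_get_features_for_sample; infer_instance

-- ===== CLAIM (what is proved, stated in full; the proofs are below) =====
def Claim_equal_get_features_for_sample : Prop := ∀ (sample : List String), Dom_get_features_for_sample sample → Spec_get_features_for_sample sample (get_features_for_sample sample)

-- ===== LEMMAS AND PROOFS =====

-- the binary search keeps its invariant and lands on the ≤x / >x boundary of a sorted list
theorem altBisect_inv (vals : List Int) (x : Int) (lo hi : Nat)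
    (hhi : hi ≤ vals.length) (hlo : lo ≤ hi)
    (h1 : ∀ j, j < lo → ∀ (hj : j < vals.length), vals[j] ≤ x)
    (h2 : ∀ j, hi ≤ j → ∀ (hj : j < vals.length), x < vals[j])
    (hs : vals.Pairwise (· ≤ ·)) :
    altBisect vals x lo hi ≤ vals.length ∧
      (∀ j, j < altBisect vals x lo hi → ∀ (hj : j < vals.length), vals[j] ≤ x) ∧
      (∀ j, altBisect vals x lo hi ≤ j → ∀ (hj : j < vals.length), x < vals[j]) := by
  have hmono := List.pairwise_iff_getElem.mp hs
  fun_induction altBisect vals x lo hi with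
  | case1 lo hi hlt mid hx ih =>
      apply ih (by omega) (by omega) h1
      intro j hj hjlen
      have hmidlen : mid < vals.length := by omega
      have : vals[mid] ≤ vals[j] := by
        rcases Nat.eq_or_lt_of_le hj with h | h
        · simp [h]
        · exact hmono mid j hmidlen hjlen h
      have hgd : vals.getD mid 0 = vals[mid] := List.getD_eq_getElem vals 0 hmidlen
      rw [hgd] at hx
      exact lt_of_lt_of_le hx this
  | case2 lo hi hlt mid hx ih =>
      apply ih (by omega) (by omega)
      · intro j hj hjlen
        have hmidlen : mid < vals.length := by omega
        have hgd : vals.getD mid 0 = vals[mid] := List.getD_eq_getElem vals 0 hmidlen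
        rw [hgd] at hx
        rw [not_lt] at hx
        rcases Nat.lt_succ_iff_lt_or_eq.mp hj with h | h
        · exact le_trans (hmono j mid hjlen hmidlen h) hx
        · subst h; exact hx
      · exact h2
  | case3 lo hi hlt => exact ⟨by omega, fun j hj hjlen => h1 j (by omega) hjlen, fun j hj hjlen => h2 j (by omega) hjlen⟩

-- a list whose first r positions satisfy v ≤ x and whose rest satisfy x < v has exactly r elements ≤ x
theorem countP_boundary (l : List Int) (x : Int) (r : Nat) (hr : r ≤ l.length)
    (h1 : ∀ j, j < r → ∀ (hj : j < l.length), l[j] ≤ x)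
    (h2 : ∀ j, r ≤ j → ∀ (hj : j < l.length), x < l[j]) :
    l.countP (fun v => decide (v ≤ x)) = r := by
  induction l generalizing r with
  | nil => simp at hr ⊢; omega
  | cons a t ih =>
      cases r with
      | zero =>
          have ha : x < a := h2 0 (by omega) (by simp)
          rw [List.countP_cons, List.countP_eq_zero.mpr]
          · simp [not_le.mpr ha]
          · intro v hv
            obtain ⟨i, hi, rfl⟩ := List.mem_iff_getElem.mp hv
            have := h2 (i+1) (by omega) (by simpa using Nat.succ_lt_succ hi)
            simpa [not_le] using this
      | succ r' =>
          have ha : a ≤ x := h1 0 (by omega) (by simp)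
          rw [List.countP_cons]
          have := ih r' (by simpa using hr)
            (fun j hj hjl => by simpa using h1 (j+1) (by omega) (by simpa using Nat.succ_lt_succ hjl))
            (fun j hj hjl => by simpa using h2 (j+1) (by omega) (by simpa using Nat.succ_lt_succ hjl))
          simp [this, ha]

theorem altBisect_countP (vals : List Int) (x : Int) (hs : vals.Pairwise (· ≤ ·)) :
    altBisect vals x 0 vals.length = vals.countP (fun v => decide (v ≤ x)) := by
  obtain ⟨h0, h1, h2⟩ := altBisect_inv vals x 0 vals.length le_rfl (by omega)
    (by omega) (fun j hj hjl => absurd hjl (by omega)) hs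
  exact (countP_boundary vals x _ h0 h1 h2).symm

-- A's classification fold counts each bucket
theorem fold_buckets (l : List Int) (a b c : Int) :
    l.foldl (fun (acc : Int × Int × Int) occurrances =>
      if occurrances ≤ 1 then (acc.1 + 1, acc.2.1, acc.2.2)
      else if occurrances ≤ 4 then (acc.1, acc.2.1 + 1, acc.2.2)
      else if occurrances ≤ 10 then (acc.1, acc.2.1, acc.2.2 + 1)
      else acc) (a, b, c)
    = (a + l.countP (fun v => decide (v ≤ 1)),
       b + l.countP (fun v => decide (1 < v ∧ v ≤ 4)),
       c + l.countP (fun v => decide (4 < v ∧ v ≤ 10))) := by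
  induction l generalizing a b c with
  | nil => simp
  | cons v t ih =>
      simp only [List.foldl_cons]
      split_ifs with hv1 hv4 hv10
      · rw [ih]
        simp [hv1, show ¬(1 < v ∧ v ≤ 4) by omega, show ¬(4 < v ∧ v ≤ 10) by omega]
        ring
      · rw [ih]
        simp [hv1, show (1 < v ∧ v ≤ 4) by omega, show ¬(4 < v ∧ v ≤ 10) by omega]
        ring
      · rw [ih]
        simp [hv1, show ¬(1 < v ∧ v ≤ 4) by omega, show (4 < v ∧ v ≤ 10) by omega]
        ring
      · rw [ih]
        simp [hv1, show ¬(1 < v ∧ v ≤ 4) by omega, show ¬(4 < v ∧ v ≤ 10) by omega]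

theorem countP_split (l : List Int) (y z : Int) (hyz : y ≤ z) :
    l.countP (fun v => decide (v ≤ z))
      = l.countP (fun v => decide (v ≤ y)) + l.countP (fun v => decide (y < v ∧ v ≤ z)) := by
  induction l with
  | nil => simp
  | cons v t ih =>
      simp only [List.countP_cons, ih]
      by_cases h : v ≤ y
      · simp [h, le_trans h hyz, show ¬y < v by omega]; omega
      · by_cases h2 : v ≤ z
        · simp [h, h2, show y < v by omega]; omega
        · simp [h, h2]

theorem ports_agree (sample : List String) :
    get_features_for_sample sample = get_features_for_sample_alt sample := by
  simp only [get_features_for_sample, get_features_for_sample_alt]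
  rw [← PySem.Dict.counter_eq_foldl]
  set counts := PySem.Dict.counter sample with hc
  set vals := PySem.List.sorted counts.values (fun v => v) false with hv
  have hperm : vals.Perm counts.values := PySem.List.sorted_perm _ _ _
  have hpw : vals.Pairwise (· ≤ ·) := by
    have := PySem.List.sorted_pairwise counts.values (fun v => v)
    simpa using this
  rw [fold_buckets]
  have e1 := altBisect_countP vals 1 hpw
  have e4 := altBisect_countP vals 4 hpw
  have e10 := altBisect_countP vals 10 hpw
  have p1 := hperm.countP_eq (fun v => decide (v ≤ 1))
  have p4 := hperm.countP_eq (fun v => decide (v ≤ 4))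
  have p10 := hperm.countP_eq (fun v => decide (v ≤ 10))
  have s4 := countP_split counts.values 1 4 (by omega)
  have s10 := countP_split counts.values 4 10 (by omega)
  simp only [e1, e4, e10, p1, p4, p10, List.cons.injEq, and_true, true_and]
  refine ⟨by omega, by omega, by omega⟩

-- ===== VERDICT (by name: the statement is the Claim_ definition above) =====
theorem get_features_for_sample_spec : Claim_equal_get_features_for_sample := by
  intro sample _
  unfold Spec_get_features_for_sample
  exact ports_agree sample
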